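-- pv_equiv track=rewrite | github.com/pypi-data/pypi-mirror-402 | packages/kiva-sdk/kiva_sdk-0.4.0.tar.gz/kiva_sdk-0.4.0/src/kiva/workflows/parliament.py | _create_conflict_resolution_tasks
-- ===== SOURCE A (Python) =====
-- def _create_conflict_resolution_tasks(
--     conflicts: list[dict], original_prompt: str, agent_results: list[dict]
-- ) -> list[dict]:
--     """Create task assignments to resolve identified conflicts.
--
--     Generates new tasks for agents involved in conflicts, asking them to
--     reconsider and justify their responses.
--
--     Args:
--         conflicts: List of conflict dictionaries from _identify_conflicts.
--         original_prompt: The original user prompt/question.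
--         agent_results: Previous results from agent executions.
--
--     Returns:
--         List of task assignment dictionaries with agent_id and task fields.
--     """
--     if not conflicts:
--         return []
--
--     resolution_tasks, seen_agents = [], set()
--     for conflict in conflicts:
--         for agent_id in conflict.get("agents", []):
--             if agent_id and agent_id not in seen_agents:
--                 seen_agents.add(agent_id)
--                 prev_result = next(
--                     (
--                         r.get("result", "")
--                         for r in agent_results
--                         if r.get("agent_id") == agent_id
--                     ),
--                     "",
--                 )
--                 resolution_tasks.append(
--                     {
--                         "agent_id": agent_id,
--                         "task": (
--                             "Review and verify your previous response "
--                             "considering potential conflicts.\n\n"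
--                             f"Original question: {original_prompt}\n\n"
--                             f"Your previous response: {prev_result[:500]}...\n\n"
--                             "Please reconsider your answer and provide a more "
--                             "detailed justification. If you find any errors in "
--                             "your previous response, correct them."
--                         ),
--                     }
--                 )
--     return resolution_tasks
-- ===== SOURCE B (Python) =====
-- def _create_conflict_resolution_tasks(conflicts, original_prompt, agent_results):
--     # Pass 1: ordered first-occurrence unique agent ids (falsy ids dropped).
--     unique = list(dict.fromkeys(
--         a for c in conflicts for a in c.get("agents", []) if a
--     ))
--     # Pass 2: first-wins index of previous results by agent_id.
--     results_by_id = {}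
--     for r in agent_results:
--         aid = r.get("agent_id")
--         if aid is not None and aid not in results_by_id:
--             results_by_id[aid] = r.get("result", "")
--     # Pass 3: build the task list.
--     return [
--         {
--             "agent_id": a,
--             "task": (
--                 "Review and verify your previous response "
--                 "considering potential conflicts.\n\n"
--                 f"Original question: {original_prompt}\n\n"
--                 f"Your previous response: {results_by_id.get(a, '')[:500]}...\n\n"
--                 "Please reconsider your answer and provide a more "
--                 "detailed justification. If you find any errors in "
--                 "your previous response, correct them."
--             ),
--         }
--         for a in unique
--     ]
-- ===== Notes on version B (the rewrite author's own statement) =====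
-- stated objective: simpler
-- what changed: Replaced A's single interleaved nested loop carrying a seen-set and doing an inline scan of agent_results per new agent by three sequential passes: an ordered first-occurrence dedup of all agent ids, a first-wins index of results by agent_id built once, and a final comprehension over the unique ids.
import Mathlib
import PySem

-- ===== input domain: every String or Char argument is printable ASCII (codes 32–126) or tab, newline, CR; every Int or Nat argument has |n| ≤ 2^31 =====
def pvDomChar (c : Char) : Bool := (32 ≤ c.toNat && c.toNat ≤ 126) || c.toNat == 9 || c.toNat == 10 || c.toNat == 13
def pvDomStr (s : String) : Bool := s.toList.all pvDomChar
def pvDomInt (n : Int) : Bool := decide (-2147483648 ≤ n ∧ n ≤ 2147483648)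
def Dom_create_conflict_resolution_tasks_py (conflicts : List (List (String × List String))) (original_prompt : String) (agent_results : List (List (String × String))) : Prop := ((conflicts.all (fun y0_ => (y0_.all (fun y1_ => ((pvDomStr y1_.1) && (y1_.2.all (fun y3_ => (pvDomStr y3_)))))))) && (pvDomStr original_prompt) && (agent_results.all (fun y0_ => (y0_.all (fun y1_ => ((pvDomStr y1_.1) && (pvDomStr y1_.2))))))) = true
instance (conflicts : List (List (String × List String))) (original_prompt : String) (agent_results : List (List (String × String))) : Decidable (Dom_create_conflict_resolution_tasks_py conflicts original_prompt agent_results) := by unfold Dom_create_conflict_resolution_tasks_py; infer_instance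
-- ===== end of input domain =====

-- B replaces A's interleaved loop (seen-set + inline scan of agent_results per agent) by three
-- sequential passes: ordered dedup of ids, a first-wins result index, and a final map (simpler).

-- d.get(k, dflt) on a dict given as an assoc list = first match (exact under the type convention)
def pvAssocGetD {α : Type} (r : List (String × α)) (k : String) (dflt : α) : α :=
  (List.lookup k r).getD dflt

-- the resolution-task message (shared text of both Pythons, exact)
def pvMsg (original_prompt prev : String) : String :=
  "Review and verify your previous response considering potential conflicts.\n\nOriginal question: "
  ++ original_prompt
  ++ "\n\nYour previous response: "
  ++ PySem.Str.slice prev none (some 500)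
  ++ "...\n\nPlease reconsider your answer and provide a more detailed justification. If you find any errors in your previous response, correct them."

-- ===== PORT A =====
-- next((r.get("result","") for r in agent_results if r.get("agent_id") == agent_id), "")
def pvPrevA (agent_results : List (List (String × String))) (aid : String) : String :=
  match agent_results with
  | [] => ""
  | r :: rs =>
    if List.lookup "agent_id" r == some aid then pvAssocGetD r "result" ""
    else pvPrevA rs aid

-- the body of A's inner loop (state = (resolution_tasks, seen_agents))
def pvStepA (original_prompt : String) (agent_results : List (List (String × String)))
    (st : List (List (String × String)) × PySem.Set String) (aid : String) :
    List (List (String × String)) × PySem.Set String :=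
  if !(aid == "") && !(PySem.Set.contains st.2 aid) then
    (st.1 ++ [[("agent_id", aid), ("task", pvMsg original_prompt (pvPrevA agent_results aid))]],
     PySem.Set.add st.2 aid)
  else st

def create_conflict_resolution_tasks_py (conflicts : List (List (String × List String))) (original_prompt : String) (agent_results : List (List (String × String))) : List (List (String × String)) :=
  if conflicts.isEmpty then []
  else
    (conflicts.foldl
      (fun st conflict =>
        (pvAssocGetD conflict "agents" []).foldl (pvStepA original_prompt agent_results) st)
      ([], PySem.Set.empty)).1

-- ===== PORT B =====
-- pass 2 loop body: first-wins index of results by agent_id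
def pvStepIdx (d : PySem.Dict String String) (r : List (String × String)) : PySem.Dict String String :=
  match List.lookup "agent_id" r with
  | some aid => if d.contains aid then d else d.insert aid (pvAssocGetD r "result" "")
  | none => d

def create_conflict_resolution_tasks_py_alt (conflicts : List (List (String × List String))) (original_prompt : String) (agent_results : List (List (String × String))) : List (List (String × String)) :=
  let unique := PySem.List.dedup
    ((conflicts.flatMap (fun c => pvAssocGetD c "agents" [])).filter (fun a => !(a == "")))
  let results_by_id := agent_results.foldl pvStepIdx PySem.Dict.empty
  unique.map (fun a =>
    [("agent_id", a), ("task", pvMsg original_prompt (results_by_id.getD a ""))])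

-- ===== PRECONDITION & SPEC =====
def Spec_create_conflict_resolution_tasks_py (conflicts : List (List (String × List String))) (original_prompt : String) (agent_results : List (List (String × String))) (out : List (List (String × String))) : Prop := out = create_conflict_resolution_tasks_py_alt conflicts original_prompt agent_results
instance (conflicts : List (List (String × List String))) (original_prompt : String) (agent_results : List (List (String × String))) (out : List (List (String × String))) : Decidable (Spec_create_conflict_resolution_tasks_py conflicts original_prompt agent_results out) := by unfold Spec_create_conflict_resolution_tasks_py; infer_instance

-- ===== CLAIM (what is proved, stated in full; the proofs are below) =====
def Claim_equal_create_conflict_resolution_tasks_py : Prop := ∀ (conflicts : List (List (String × List String))) (original_prompt : String) (agent_results : List (List (String × String))), Dom_create_conflict_resolution_tasks_py conflicts original_prompt agent_results → Spec_create_conflict_resolution_tasks_py conflicts original_prompt agent_results (create_conflict_resolution_tasks_py conflicts original_prompt agent_results)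

-- ===== LEMMAS AND PROOFS =====

-- the new (nonempty, not-yet-seen) agent ids of ys relative to seen-set s, in order
def pvNewOnes (s : List String) (ys : List String) : List String :=
  match ys with
  | [] => []
  | a :: t => if a ≠ "" ∧ a ∉ s then a :: pvNewOnes (s ++ [a]) t else pvNewOnes s t

theorem pv_foldl_flatMap {α β σ : Type} (f : α → List β) (step : σ → β → σ) :
    ∀ (xs : List α) (init : σ),
      xs.foldl (fun st c => (f c).foldl step st) init = (xs.flatMap f).foldl step init := by
  intro xs
  induction xs with
  | nil => intro init; rfl
  | cons x t ih =>
    intro init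
    simp [List.foldl_cons, List.flatMap_cons, List.foldl_append, ih]

theorem pv_main (op : String) (ar : List (List (String × String))) :
    ∀ (ys : List String) (acc : List (List (String × String))) (s : PySem.Set String),
      (ys.foldl (pvStepA op ar) (acc, s)).1
        = acc ++ (pvNewOnes s ys).map
            (fun aid => [("agent_id", aid), ("task", pvMsg op (pvPrevA ar aid))]) := by
  intro ys
  induction ys with
  | nil => intro acc s; simp [pvNewOnes]
  | cons a t ih =>
    intro acc s
    by_cases h1 : a = ""
    · subst h1
      simp [List.foldl_cons, pvStepA, pvNewOnes, ih]
    · by_cases h2 : a ∈ s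
      · simp [List.foldl_cons, pvStepA, pvNewOnes, h1, h2, PySem.Set.contains_eq_listContains, ih]
      · simp [List.foldl_cons, pvStepA, pvNewOnes, h1, h2, PySem.Set.contains_eq_listContains, ih]

theorem pv_update_newOnes :
    ∀ (ys : List String) (s : PySem.Set String),
      PySem.Set.update s (ys.filter (fun a => !(a == ""))) = s ++ pvNewOnes s ys := by
  intro ys
  induction ys with
  | nil => intro s; simp [pvNewOnes, PySem.Set.update]
  | cons a t ih =>
    intro s
    by_cases h1 : a = ""
    · subst h1; simp [pvNewOnes, ih]
    · have hf : List.filter (fun x => !(x == "")) (a :: t)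
          = a :: List.filter (fun x => !(x == "")) t := by simp [h1]
      rw [hf, PySem.Set.update_cons]
      by_cases h2 : a ∈ s
      · rw [PySem.Set.add_of_mem h2, ih]
        simp [pvNewOnes, h1, h2]
      · rw [PySem.Set.add_of_not_mem h2, ih]
        simp [pvNewOnes, h1, h2]

theorem pv_dedup_newOnes (ys : List String) :
    PySem.List.dedup (ys.filter (fun a => !(a == ""))) = pvNewOnes [] ys := by
  have h := pv_update_newOnes ys []
  simpa [PySem.Set.update_nil_left] using h

theorem pvStepIdx_some (d : PySem.Dict String String) (r : List (String × String)) (a : String)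
    (hl : List.lookup "agent_id" r = some a) :
    pvStepIdx d r = if d.contains a then d else d.insert a (pvAssocGetD r "result" "") := by
  simp [pvStepIdx, hl]

theorem pvStepIdx_none (d : PySem.Dict String String) (r : List (String × String))
    (hl : List.lookup "agent_id" r = none) : pvStepIdx d r = d := by
  simp [pvStepIdx, hl]

-- the first-wins index agrees with A's inline scan
theorem pv_idx (aid : String) :
    ∀ (ar : List (List (String × String))) (d : PySem.Dict String String),
      (ar.foldl pvStepIdx d).getD aid ""
        = if d.contains aid then d.getD aid "" else pvPrevA ar aid := by
  intro ar
  induction ar with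
  | nil =>
    intro d
    by_cases h : d.contains aid
    · simp [h]
    · have hc : d.contains aid = false := by simpa using h
      simp [hc, pvPrevA, PySem.Dict.getD_of_not_contains d "" hc]
  | cons r rs ih =>
    intro d
    simp only [List.foldl_cons]
    cases hl : List.lookup "agent_id" r with
    | none =>
      rw [pvStepIdx_none d r hl, ih]
      have hbeq : (List.lookup "agent_id" r == some aid) = false := by simp [hl]
      simp [pvPrevA, hbeq]
    | some a =>
      rw [pvStepIdx_some d r a hl]
      by_cases ha : a = aid
      · subst ha
        by_cases hc : d.contains a
        · rw [if_pos hc, ih]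
          simp [hc]
        · rw [if_neg hc, ih]
          have hc' : d.contains a = false := by simpa using hc
          simp [PySem.Dict.contains_insert_self, PySem.Dict.getD_insert_self, hc', pvPrevA, hl]
      · have hbeq : (List.lookup "agent_id" r == some aid) = false := by simp [hl, ha]
        by_cases hc : d.contains a
        · rw [if_pos hc, ih]
          simp [pvPrevA, hbeq]
        · rw [if_neg hc, ih]
          have h1 : (d.insert a (pvAssocGetD r "result" "")).contains aid = d.contains aid := by
            rw [PySem.Dict.contains_insert]
            simp [show (aid == a) = false from by simp [Ne.symm ha]]
          have h2 : (d.insert a (pvAssocGetD r "result" "")).getD aid ""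
              = d.getD aid "" := PySem.Dict.getD_insert_of_ne _ _ _ (Ne.symm ha)
          simp [pvPrevA, hbeq, h1, h2]

-- ===== VERDICT (by name: the statement is the Claim_ definition above) =====
theorem create_conflict_resolution_tasks_py_spec : Claim_equal_create_conflict_resolution_tasks_py := by
  intro conflicts op ar _
  unfold Spec_create_conflict_resolution_tasks_py
  unfold create_conflict_resolution_tasks_py create_conflict_resolution_tasks_py_alt
  rw [pv_foldl_flatMap, pv_main, pv_dedup_newOnes]
  have hmap : ∀ aid,
      (ar.foldl pvStepIdx PySem.Dict.empty).getD aid "" = pvPrevA ar aid := by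
    intro aid
    rw [pv_idx]
    simp [PySem.Dict.contains_empty]
  by_cases h : conflicts = []
  · subst h; simp [pvNewOnes]
  · simp only [List.isEmpty_iff, h, if_neg, not_false_iff, List.nil_append]
    exact (List.map_congr_left (fun aid _ => by rw [hmap])).symm
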